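-- pv_equiv track=rewrite | github.com/fullscreen-triangle/hegel | backend/api/services/data_sources.py | _extract_pubchem_name
-- ===== SOURCE A (Python) =====
-- from typing import Dict, List, Any, Optional, Union
--
-- def _extract_pubchem_name(compound: Dict) -> Optional[str]:
--     """Extract compound name from PubChem data."""
--     if 'synonyms' in compound and compound['synonyms']:
--         for syn_type in ['Preferred', 'Traditional', 'Systematic']:
--             for syn in compound['synonyms']:
--                 if syn_type in syn and syn[syn_type]:
--                     return syn[syn_type][0]
--         # If no preferred names found, return first synonym
--         return compound['synonyms'][0][list(compound['synonyms'][0].keys())[0]][0]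
--     return None
-- ===== SOURCE B (Python) =====
-- _PRIORITY = ('Preferred', 'Traditional', 'Systematic')
--
-- def _extract_pubchem_name(compound):
--     """Extract compound name from PubChem data (single data-major pass)."""
--     synonyms = compound.get('synonyms')
--     if not synonyms:
--         return None
--     first = {}
--     for syn in synonyms:
--         for t, vals in syn.items():
--             if t in _PRIORITY and vals and t not in first:
--                 first[t] = vals[0]
--     for t in _PRIORITY:
--         if t in first:
--             return first[t]
--     # If no preferred names found, return first synonym
--     s0 = synonyms[0]
--     return s0[next(iter(s0))][0]
-- ===== Notes on version B (the rewrite author's own statement) =====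
-- stated objective: alternative
-- what changed: A scans the synonym list once per priority type (priority-major, up to three passes); B makes a single data-major pass building a table of the first truthy value per priority type, then reads the table in priority order.
import Mathlib
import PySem

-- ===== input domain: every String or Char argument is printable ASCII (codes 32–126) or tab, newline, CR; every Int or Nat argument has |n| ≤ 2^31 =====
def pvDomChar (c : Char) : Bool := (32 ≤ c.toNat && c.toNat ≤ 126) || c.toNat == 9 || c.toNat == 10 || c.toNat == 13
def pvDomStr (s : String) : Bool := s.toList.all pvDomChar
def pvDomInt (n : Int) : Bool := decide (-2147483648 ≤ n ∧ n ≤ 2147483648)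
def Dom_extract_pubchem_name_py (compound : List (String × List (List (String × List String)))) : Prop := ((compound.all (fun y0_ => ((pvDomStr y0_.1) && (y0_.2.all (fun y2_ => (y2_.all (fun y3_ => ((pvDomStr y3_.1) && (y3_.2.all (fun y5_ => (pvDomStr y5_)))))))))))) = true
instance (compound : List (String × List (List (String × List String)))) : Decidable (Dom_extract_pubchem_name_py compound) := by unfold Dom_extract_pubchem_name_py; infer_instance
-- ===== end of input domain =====

-- B replaces A's priority-major triple scan by one data-major pass that tables the first
-- truthy value per priority type; equal on Pre_ (no duplicate-key synonym dicts — impossible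
-- for a Python dict — and fallback indexing does not raise).


-- ===== PORT A =====
-- shared one-liner: compound['synonyms'][0][list(compound['synonyms'][0].keys())[0]][0]
-- (first key of the first synonym dict, first element of its value; none = IndexError/KeyError,
-- excluded by Pre_)
def pvFallback (syn0 : List (String × List String)) : Option String :=
  match syn0.head? with
  | some (k, _) =>
    match List.lookup k syn0 with
    | some (v :: _) => some v
    | _ => none
  | none => none

-- inner 'for syn in compound["synonyms"]' for one syn_type
def pvFindType (syns : List (List (String × List String))) (t : String) : Option String :=
  match syns with
  | [] => none
  | syn :: rest =>
    match List.lookup t syn with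
    | some (v :: _) => some v
    | _ => pvFindType rest t

-- outer 'for syn_type in ["Preferred", "Traditional", "Systematic"]'
def pvPriorityLoop (types : List String) (syns : List (List (String × List String))) : Option String :=
  match types with
  | [] => none
  | t :: ts =>
    match pvFindType syns t with
    | some v => some v
    | none => pvPriorityLoop ts syns

def extract_pubchem_name_py (compound : List (String × List (List (String × List String)))) : Option String :=
  match List.lookup "synonyms" compound with
  | some (syn0 :: rest) =>
    match pvPriorityLoop ["Preferred", "Traditional", "Systematic"] (syn0 :: rest) with
    | some v => some v
    | none => pvFallback syn0
  | _ => none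

-- ===== PORT B =====
-- one item of the data-major pass: record the first truthy value per priority type
def pvStep (acc : PySem.Dict String String) (p : String × List String) : PySem.Dict String String :=
  if p.1 == "Preferred" || p.1 == "Traditional" || p.1 == "Systematic" then
    match p.2 with
    | v :: _ => if acc.contains p.1 then acc else acc.insert p.1 v
    | [] => acc
  else acc

def pvCollect (syns : List (List (String × List String))) : PySem.Dict String String :=
  syns.foldl (fun a syn => syn.foldl pvStep a) PySem.Dict.empty

-- 'for t in _PRIORITY: if t in first: return first[t]'
def pvPick (types : List String) (d : PySem.Dict String String) : Option String :=
  match types with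
  | [] => none
  | t :: ts =>
    match d.get? t with
    | some v => some v
    | none => pvPick ts d

def extract_pubchem_name_py_alt (compound : List (String × List (List (String × List String)))) : Option String :=
  match List.lookup "synonyms" compound with
  | some (syn0 :: rest) =>
    match pvPick ["Preferred", "Traditional", "Systematic"] (pvCollect (syn0 :: rest)) with
    | some v => some v
    | none => pvFallback syn0
  | _ => none

-- ===== PRECONDITION & SPEC =====
-- Pre_ excludes (a) synonym entries whose association list carries a duplicate key — a Python
-- dict cannot represent those, so A's behaviour there is undefined — and (b) inputs where no
-- priority synonym is present and the final fallback indexing raises IndexError (empty first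
-- synonym dict or empty first value list), on which A raises and B raises identically.
def pvPreCheck (compound : List (String × List (List (String × List String)))) : Bool :=
  match List.lookup "synonyms" compound with
  | some (syn0 :: rest) =>
    ((syn0 :: rest).all fun syn => decide (syn.map Prod.fst).Nodup) &&
    (((syn0 :: rest).any fun syn =>
        ["Preferred", "Traditional", "Systematic"].any fun t =>
          match List.lookup t syn with
          | some (_ :: _) => true
          | _ => false) ||
      (match syn0 with
       | (_, _ :: _) :: _ => true
       | _ => false))
  | _ => true

def Pre_extract_pubchem_name_py (compound : List (String × List (List (String × List String)))) : Prop :=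
  pvPreCheck compound = true
instance (compound : List (String × List (List (String × List String)))) : Decidable (Pre_extract_pubchem_name_py compound) := by unfold Pre_extract_pubchem_name_py; infer_instance

def pvWitness_extract_pubchem_name_py : (List (String × List (List (String × List String)))) :=
  [("synonyms", [[("Preferred", ["aspirin"])]])]

def Spec_extract_pubchem_name_py (compound : List (String × List (List (String × List String)))) (out : Option String) : Prop := out = extract_pubchem_name_py_alt compound
instance (compound : List (String × List (List (String × List String)))) (out : Option String) : Decidable (Spec_extract_pubchem_name_py compound out) := by unfold Spec_extract_pubchem_name_py; infer_instance

-- ===== CLAIM (what is proved, stated in full; the proofs are below) =====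
def Claim_equal_extract_pubchem_name_py : Prop := ∀ (compound : List (String × List (List (String × List String)))), Dom_extract_pubchem_name_py compound → Pre_extract_pubchem_name_py compound → Spec_extract_pubchem_name_py compound (extract_pubchem_name_py compound)

-- ===== LEMMAS AND PROOFS =====

-- first truthy value for type t in one synonym dict
def pvFirst (syn : List (String × List String)) (t : String) : Option String :=
  match List.lookup t syn with
  | some (v :: _) => some v
  | _ => none

lemma pvFindType_cons (syn : List (String × List String)) (rest : List (List (String × List String))) (t : String) :
    pvFindType (syn :: rest) t = (pvFirst syn t).or (pvFindType rest t) := by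
  rcases h : List.lookup t syn with _ | ⟨_ | ⟨v, vs⟩⟩ <;> simp [pvFindType, pvFirst, h]

lemma step_get (t : String) (ht : t = "Preferred" ∨ t = "Traditional" ∨ t = "Systematic")
    (syn : List (String × List String)) (hnd : (syn.map Prod.fst).Nodup)
    (acc : PySem.Dict String String) :
    (syn.foldl pvStep acc).get? t = (acc.get? t).or (pvFirst syn t) := by
  induction syn generalizing acc with
  | nil => simp [pvFirst]
  | cons p rest ih =>
    simp only [List.map_cons, List.nodup_cons] at hnd
    simp only [List.foldl_cons]
    rw [ih hnd.2]
    by_cases hpt : p.1 = t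
    · have hnone : List.lookup t rest = none := by
        rw [List.lookup_eq_none_iff]
        intro q hq
        simp only [bne_iff_ne, ne_eq]
        intro he
        exact hnd.1 (by rw [hpt, he]; exact List.mem_map_of_mem hq)
      have hrest : pvFirst rest t = none := by simp [pvFirst, hnone]
      have hlk : pvFirst (p :: rest) t
          = (match p.2 with | v :: _ => some v | [] => none) := by
        rcases p with ⟨k, vs⟩
        simp only at hpt
        rcases vs with _ | ⟨v, vs⟩ <;> simp [pvFirst, List.lookup, hpt]
      have hp : (p.1 == "Preferred" || p.1 == "Traditional" || p.1 == "Systematic") = true := by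
        rw [hpt]; rcases ht with h | h | h <;> simp [h]
      rw [hrest, hlk, Option.or_none]
      rcases hv : p.2 with _ | ⟨v, vs⟩
      · simp [pvStep, hv]
      · by_cases hc : acc.contains p.1 = true
        · rw [hpt] at hc hp
          rcases hg : acc.get? t with _ | w
          · rw [(PySem.Dict.get?_eq_none_iff_contains acc t).mp hg] at hc; cases hc
          · simp [pvStep, hv, hpt, hp, hc, hg]
        · have hcf : acc.contains p.1 = false := by simpa using hc
          rw [hpt] at hcf hp
          have hg : acc.get? t = none :=
            (PySem.Dict.get?_eq_none_iff_contains acc t).mpr hcf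
          simp [pvStep, hv, hpt, hp, hcf, hg, PySem.Dict.get?_insert_self]
    · have hlk : pvFirst (p :: rest) t = pvFirst rest t := by
        have hne : (t == p.1) = false := by simp [Ne.symm hpt]
        simp [pvFirst, List.lookup, hne]
      have hacc : (pvStep acc p).get? t = acc.get? t := by
        unfold pvStep
        split
        · rcases p.2 with _ | ⟨v, vs⟩
          · rfl
          · by_cases hc : acc.contains p.1 = true <;>
              simp [hc, PySem.Dict.get?_insert_of_ne acc _ (Ne.symm hpt)]
        · rfl
      rw [hlk, hacc]

lemma collect_get (t : String) (ht : t = "Preferred" ∨ t = "Traditional" ∨ t = "Systematic")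
    (syns : List (List (String × List String)))
    (hnd : ∀ syn ∈ syns, (syn.map Prod.fst).Nodup)
    (acc : PySem.Dict String String) :
    (syns.foldl (fun a syn => syn.foldl pvStep a) acc).get? t
      = (acc.get? t).or (pvFindType syns t) := by
  induction syns generalizing acc with
  | nil => simp [pvFindType]
  | cons syn rest ih =>
    simp only [List.foldl_cons]
    rw [ih (fun s hs => hnd s (List.mem_cons_of_mem _ hs)),
        step_get t ht syn (hnd syn (List.mem_cons_self)),
        pvFindType_cons, Option.or_assoc]

lemma pick_eq_loop (d : PySem.Dict String String)
    (syns : List (List (String × List String))) :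
    ∀ ts : List String, (∀ t ∈ ts, d.get? t = pvFindType syns t) →
      pvPick ts d = pvPriorityLoop ts syns
  | [], _ => rfl
  | t :: ts, h => by
    unfold pvPick pvPriorityLoop
    rw [h t List.mem_cons_self]
    cases pvFindType syns t with
    | some v => rfl
    | none => exact pick_eq_loop d syns ts (fun u hu => h u (List.mem_cons_of_mem _ hu))

-- ===== VERDICT (by name: the statement is the Claim_ definition above) =====
theorem extract_pubchem_name_py_spec : Claim_equal_extract_pubchem_name_py := by
  intro compound _ hpre
  unfold Spec_extract_pubchem_name_py
  unfold Pre_extract_pubchem_name_py pvPreCheck at hpre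
  unfold extract_pubchem_name_py extract_pubchem_name_py_alt
  rcases hlk : List.lookup "synonyms" compound with _ | ⟨_ | ⟨syn0, rest⟩⟩
  · rfl
  · rfl
  · rw [hlk] at hpre
    simp only [List.all_cons, List.all_eq_true, Bool.and_eq_true, decide_eq_true_eq] at hpre
    have hnd : ∀ syn ∈ syn0 :: rest, (syn.map Prod.fst).Nodup := by
      intro syn hs
      rcases List.mem_cons.mp hs with h | h
      · exact h ▸ hpre.1.1
      · exact hpre.1.2 syn h
    have key : ∀ t, t = "Preferred" ∨ t = "Traditional" ∨ t = "Systematic" →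
        (pvCollect (syn0 :: rest)).get? t = pvFindType (syn0 :: rest) t := by
      intro t ht
      unfold pvCollect
      rw [collect_get t ht _ hnd]
      simp [PySem.Dict.get?_empty]
    have hpick : pvPick ["Preferred", "Traditional", "Systematic"] (pvCollect (syn0 :: rest))
        = pvPriorityLoop ["Preferred", "Traditional", "Systematic"] (syn0 :: rest) := by
      apply pick_eq_loop
      intro t ht
      apply key
      simp only [List.mem_cons, List.not_mem_nil, or_false] at ht
      exact ht
    show (match pvPriorityLoop ["Preferred", "Traditional", "Systematic"] (syn0 :: rest) with
          | some v => some v | none => pvFallback syn0) =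
         (match pvPick ["Preferred", "Traditional", "Systematic"] (pvCollect (syn0 :: rest)) with
          | some v => some v | none => pvFallback syn0)
    rw [hpick]
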